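-- pv_equiv track=rewrite | github.com/avishek376/Scaler-Problem-Solving | Intermediate/03 Intermediate DSA: Arrays - Prefix Sum/Assignment/Q6. Even numbers in a range/Even numbers in a range.py | solve
-- ===== SOURCE A (Python) =====
-- def solve(A, B):
--     summ = 0
--     pf = []
--     res = []
--     for i in range(len(A)):
--         if A[i] % 2 == 0:
--             resp = 1
--         else:
--             resp = 0
--         summ += resp
--         pf.append(summ)
--     for i in B:
--         L = i[0]
--         R = i[-1]
--         if L == 0:
--             res.append(pf[R])
--         else:
--             res.append(pf[R] - pf[L - 1])
--
--     return res
-- ===== SOURCE B (Python) =====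
-- def solve(A, B):
--     res = []
--     for q in B:
--         L, R = q[0], q[-1]
--         evens_to_R = sum(1 for x in A[:R + 1] if x % 2 == 0)
--         evens_before_L = sum(1 for x in A[:L] if x % 2 == 0)
--         res.append(evens_to_R - evens_before_L)
--     return res
-- ===== Notes on version B (the rewrite author's own statement) =====
-- stated objective: simpler
-- what changed: B drops the precomputed prefix-sum array and answers each query by counting evens in the plain forward slices A[:R+1] and A[:L] (inclusion-exclusion per query, no L==0 special case); Pre_ excludes queries whose last entry is -1, a corner where A's negative-index read pf[-1] and B's empty slice A[:0] are both accidental readings of a negative right endpoint.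
-- outside the precondition, e.g. on solve([2], [[0, -1]]): A returns [1], B returns [0]
import Mathlib
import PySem

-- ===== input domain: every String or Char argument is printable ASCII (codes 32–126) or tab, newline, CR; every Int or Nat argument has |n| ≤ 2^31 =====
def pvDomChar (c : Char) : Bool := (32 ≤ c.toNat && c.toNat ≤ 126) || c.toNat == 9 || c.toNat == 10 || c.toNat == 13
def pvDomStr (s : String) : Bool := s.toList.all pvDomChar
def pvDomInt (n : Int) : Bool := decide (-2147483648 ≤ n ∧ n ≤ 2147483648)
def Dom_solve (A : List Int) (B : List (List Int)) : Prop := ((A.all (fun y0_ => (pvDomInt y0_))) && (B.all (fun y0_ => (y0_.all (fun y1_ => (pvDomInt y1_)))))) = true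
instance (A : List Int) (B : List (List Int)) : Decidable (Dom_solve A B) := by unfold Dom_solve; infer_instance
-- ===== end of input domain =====

-- B drops A's precomputed prefix-sum array and answers each query by counting evens in the
-- forward slices A[:R+1] and A[:L]; objective: simpler (no speed claim).

-- ===== PORT A =====
def solve (A : List Int) (B : List (List Int)) : List Int :=
  let pf := ((PySem.List.pyRange 0 (A.length) 1).foldl (fun (st : Int × List Int) i =>
      let resp : Int := if PySem.Int.mod (PySem.List.pyGetD A i 0) 2 = 0 then 1 else 0
      (st.1 + resp, st.2 ++ [st.1 + resp])) ((0 : Int), ([] : List Int))).2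
  B.foldl (fun res q =>
      let L := PySem.List.pyGetD q 0 0
      let R := PySem.List.pyGetD q (-1) 0
      if L = 0 then res ++ [PySem.List.pyGetD pf R 0]
      else res ++ [PySem.List.pyGetD pf R 0 - PySem.List.pyGetD pf (L - 1) 0]) []

-- ===== PORT B =====
-- sum(1 for x in A[:b] if x % 2 == 0)
def cntEvenTo (A : List Int) (b : Int) : Int :=
  (PySem.List.slice A none (some b)).foldl (fun c x => if PySem.Int.mod x 2 = 0 then c + 1 else c) 0

def solve_alt (A : List Int) (B : List (List Int)) : List Int :=
  B.foldl (fun res q =>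
    let L := PySem.List.pyGetD q 0 0
    let R := PySem.List.pyGetD q (-1) 0
    let evensToR := cntEvenTo A (R + 1)
    let evensBeforeL := cntEvenTo A L
    res ++ [evensToR - evensBeforeL]) []

-- ===== PRECONDITION & SPEC =====
-- Pre_ excludes exactly (a) the inputs where Python A raises — an empty query (IndexError on
-- q[0]) or a query index outside [-len(A), len(A)) for the prefix array — and (b) queries whose
-- last entry is -1, a corner where A's negative-index read pf[-1] (count over all of A) and B's
-- empty slice A[:0] (count 0) are both accidental readings of a negative right endpoint.
def Pre_solve (A : List Int) (B : List (List Int)) : Prop :=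
  ∀ q ∈ B, q ≠ [] ∧ PySem.Raise.InRange A.length (q.getLastD 0) ∧ q.getLastD 0 ≠ -1 ∧
    (q.headD 0 = 0 ∨ PySem.Raise.InRange A.length (q.headD 0 - 1))
instance (A : List Int) (B : List (List Int)) : Decidable (Pre_solve A B) := by unfold Pre_solve; infer_instance

def pvWitness_solve : List Int × List (List Int) := ([2, 3], [[0, 1], [1, 1]])

def Spec_solve (A : List Int) (B : List (List Int)) (out : List Int) : Prop := out = solve_alt A B
instance (A : List Int) (B : List (List Int)) (out : List Int) : Decidable (Spec_solve A B out) := by unfold Spec_solve; infer_instance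

-- ===== CLAIM (what is proved, stated in full; the proofs are below) =====
def Claim_equal_solve : Prop := ∀ (A : List Int) (B : List (List Int)), Dom_solve A B → Pre_solve A B → Spec_solve A B (solve A B)

-- ===== LEMMAS AND PROOFS =====

-- parity test as a Bool, and the count of evens among the first m elements of A
def evenB (x : Int) : Bool := PySem.Int.mod x 2 == 0
def E (A : List Int) (m : Nat) : Int := ((A.take m).countP evenB : Int)

theorem countFold_eq (l : List Int) :
    l.foldl (fun c x => if PySem.Int.mod x 2 = 0 then c + 1 else c) 0 = ((l.countP evenB : Nat) : Int) := by
  have hfun : (fun (c : Int) (x : Int) => if PySem.Int.mod x 2 = 0 then c + 1 else c)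
      = (fun (c : Int) (x : Int) => if evenB x = true then c + 1 else c) := by
    funext c x; simp [evenB]
  rw [hfun, PySem.List.foldl_count_if]
  simp

theorem E_succ (A : List Int) (n : Nat) (hn : n < A.length) :
    E A (n + 1) = E A n + (if PySem.Int.mod A[n] 2 = 0 then 1 else 0) := by
  unfold E
  rw [List.take_add_one, List.getElem?_eq_getElem hn]
  simp only [Option.toList_some, List.countP_append, List.countP_cons, List.countP_nil,
    Nat.zero_add, evenB, beq_iff_eq]
  by_cases h : PySem.Int.mod A[n] 2 = 0 <;> simp [h] <;> push_cast <;> ring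

theorem pf_spec (A : List Int) (n : Nat) (hn : n ≤ A.length) :
    ((PySem.List.pyRange 0 (n : Int) 1).foldl (fun (st : Int × List Int) i =>
      let resp : Int := if PySem.Int.mod (PySem.List.pyGetD A i 0) 2 = 0 then 1 else 0
      (st.1 + resp, st.2 ++ [st.1 + resp])) ((0 : Int), ([] : List Int)))
    = (E A n, (List.range n).map fun j => E A (j + 1)) := by
  induction n with
  | zero => simp [PySem.List.pyRange_one_eq_nil le_rfl, E]
  | succ m ih =>
    have hm : m < A.length := hn
    have hcast : ((m + 1 : Nat) : Int) = (m : Int) + 1 := by push_cast; ring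
    rw [hcast, PySem.List.pyRange_one_succ_right (by positivity), List.foldl_append,
        ih (Nat.le_of_lt hm)]
    have hget : PySem.List.pyGetD A (m : Int) 0 = A[m] := by
      rw [PySem.List.pyGetD_eq_getElem A 0 (by positivity) (by exact_mod_cast hm)]
      simp
    simp only [List.foldl_cons, List.foldl_nil, hget, List.range_succ, List.map_append,
      List.map_cons, List.map_nil]
    rw [E_succ A m hm]

theorem pf_getD (A : List Int) (k : Int) (h : PySem.Raise.InRange A.length k) :
    PySem.List.pyGetD ((List.range A.length).map fun j => E A (j + 1)) k 0
      = E A ((if 0 ≤ k then k else k + A.length).toNat + 1) := by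
  obtain ⟨h1, h2⟩ := h
  have hlen : ((List.range A.length).map fun j => E A (j + 1)).length = A.length := by simp
  by_cases hk : 0 ≤ k
  · rw [PySem.List.pyGetD_eq_getElem _ 0 hk (by rw [hlen]; exact_mod_cast h2)]
    have hkl : k.toNat < A.length := by omega
    simp [hk]
  · set m : Nat := (-k).toNat with hm
    have hkm : k = -(m : Int) := by omega
    have hm1 : 0 < m := by omega
    have hm2 : m ≤ A.length := by omega
    rw [hkm, PySem.List.pyGetD_neg_natCast _ m 0 hm1 (by omega)]
    have hif : (if (0 : Int) ≤ -(m : Int) then -(m : Int) else -(m : Int) + (A.length : Int))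
        = -(m : Int) + (A.length : Int) := if_neg (by omega)
    rw [hif]
    have hsub : A.length - m < A.length := by omega
    have h3 : (-(m : Int) + (A.length : Int)).toNat = A.length - m := by omega
    simp [h3]

theorem cntEvenTo_nonneg (A : List Int) (b : Int) (hb : 0 ≤ b) :
    cntEvenTo A b = E A b.toNat := by
  unfold cntEvenTo
  rw [PySem.List.slice_to A hb, countFold_eq]
  rfl

theorem cntEvenTo_neg (A : List Int) (k : Nat) (hk : 0 < k) :
    cntEvenTo A (-(k : Int)) = E A (A.length - k) := by
  unfold cntEvenTo
  rw [PySem.List.slice_to_neg_natCast A k hk, countFold_eq]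
  rfl

theorem query_heads (q : List Int) (h : q ≠ []) :
    PySem.List.pyGetD q 0 0 = q.headD 0 ∧ PySem.List.pyGetD q (-1) 0 = q.getLastD 0 := by
  constructor
  · rw [PySem.List.pyGetD_zero]
    cases q <;> simp
  · rw [PySem.List.pyGetD_neg_one q 0 h]
    cases q with
    | nil => exact absurd rfl h
    | cons a t => simp [List.getLastD_eq_getLast?, List.getLast?_eq_some_getLast]

-- pf[R] equals B's count over A[:R+1], for admitted R
theorem pfR_eq (A : List Int) (R : Int) (h : PySem.Raise.InRange A.length R) (hne : R ≠ -1) :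
    PySem.List.pyGetD ((List.range A.length).map fun j => E A (j + 1)) R 0
      = cntEvenTo A (R + 1) := by
  obtain ⟨h1, h2⟩ := h
  rw [pf_getD A R ⟨h1, h2⟩]
  by_cases hR : 0 ≤ R
  · rw [cntEvenTo_nonneg A (R + 1) (by omega)]
    congr 1
    simp [hR]; omega
  · set k : Nat := (-(R + 1)).toNat with hk
    have hkpos : 0 < k := by omega
    have hRk : R + 1 = -(k : Int) := by omega
    rw [hRk, cntEvenTo_neg A k hkpos]
    congr 1
    simp [hR]; omega

-- pf[L-1] (or 0 when L = 0) equals B's count over A[:L], for admitted L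
theorem pfL_eq (A : List Int) (L : Int) (hne : L ≠ 0) (h : PySem.Raise.InRange A.length (L - 1)) :
    PySem.List.pyGetD ((List.range A.length).map fun j => E A (j + 1)) (L - 1) 0
      = cntEvenTo A L := by
  obtain ⟨h1, h2⟩ := h
  rw [pf_getD A (L - 1) ⟨h1, h2⟩]
  by_cases hL : 0 ≤ L - 1
  · rw [cntEvenTo_nonneg A L (by omega)]
    congr 1
    simp [hL]; omega
  · set k : Nat := (-L).toNat with hk
    have hkpos : 0 < k := by omega
    have hLk : L = -(k : Int) := by omega
    rw [hLk, cntEvenTo_neg A k hkpos]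
    congr 1
    simp [hL]; omega

theorem cntEvenTo_zero (A : List Int) : cntEvenTo A 0 = 0 := by
  rw [cntEvenTo_nonneg A 0 le_rfl]
  simp [E]

theorem queries_fold (A : List Int) (Bs : List (List Int))
    (hpre : ∀ q ∈ Bs, q ≠ [] ∧ PySem.Raise.InRange A.length (q.getLastD 0) ∧ q.getLastD 0 ≠ -1 ∧
      (q.headD 0 = 0 ∨ PySem.Raise.InRange A.length (q.headD 0 - 1))) :
    ∀ (res : List Int),
    Bs.foldl (fun res q =>
      let L := PySem.List.pyGetD q 0 0
      let R := PySem.List.pyGetD q (-1) 0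
      if L = 0 then res ++ [PySem.List.pyGetD ((List.range A.length).map fun j => E A (j + 1)) R 0]
      else res ++ [PySem.List.pyGetD ((List.range A.length).map fun j => E A (j + 1)) R 0
        - PySem.List.pyGetD ((List.range A.length).map fun j => E A (j + 1)) (PySem.List.pyGetD q 0 0 - 1) 0]) res
    = Bs.foldl (fun res q =>
      let L := PySem.List.pyGetD q 0 0
      let R := PySem.List.pyGetD q (-1) 0
      let evensToR := cntEvenTo A (R + 1)
      let evensBeforeL := cntEvenTo A L
      res ++ [evensToR - evensBeforeL]) res := by
  induction Bs with
  | nil => intro res; rfl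
  | cons q t ih =>
    intro res
    obtain ⟨hq, hR, hRne, hL⟩ := hpre q (List.mem_cons_self)
    obtain ⟨hh, hl⟩ := query_heads q hq
    simp only [List.foldl_cons]
    rw [ih (fun q hq => hpre q (List.mem_cons_of_mem _ hq))]
    congr 1
    by_cases h0 : PySem.List.pyGetD q 0 0 = 0
    · rw [if_pos h0, hl, pfR_eq A _ hR hRne, h0, cntEvenTo_zero, sub_zero]
    · rcases hL with hL | hL
      · exact absurd (hh.trans hL) h0
      · rw [if_neg h0, hl, pfR_eq A _ hR hRne, hh, pfL_eq A _ (hh ▸ h0) hL]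

-- ===== VERDICT (by name: the statement is the Claim_ definition above) =====
theorem solve_spec : Claim_equal_solve := by
  unfold Claim_equal_solve
  intro A B _ hpre
  unfold Spec_solve solve solve_alt
  rw [pf_spec A A.length le_rfl]
  exact queries_fold A B hpre []
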